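-- pv_equiv track=rewrite | github.com/DP9020/Edikte-monitor | main.py | gutachten_pick_best_pdf
-- ===== SOURCE A (Python) =====
-- def gutachten_pick_best_pdf(pdfs: list) -> dict | None:
--     """Wählt das wahrscheinlichste Gutachten-PDF aus der Liste."""
--     preferred = ["gutachten", " g ", "sachverst", "sv-", "/g-", "g "]
--     for pdf in pdfs:
--         if any(kw in pdf["filename"].lower() for kw in preferred):
--             return pdf
--     for pdf in pdfs:
--         if "anlagen" not in pdf["filename"].lower():
--             return pdf
--     return pdfs[0] if pdfs else None
-- ===== SOURCE B (Python) =====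
-- def gutachten_pick_best_pdf(pdfs: list) -> dict | None:
--     """Wählt das wahrscheinlichste Gutachten-PDF aus der Liste."""
--     preferred = ["gutachten", " g ", "sachverst", "sv-", "/g-", "g "]
--
--     def priority(pdf):
--         name = pdf["filename"].lower()
--         if any(kw in name for kw in preferred):
--             return 0
--         if "anlagen" not in name:
--             return 1
--         return 2
--
--     best, best_p = None, 3
--     for pdf in pdfs:
--         p = priority(pdf)
--         if p == 0:
--             return pdf
--         if p < best_p:
--             best, best_p = pdf, p
--     return best
-- ===== Notes on version B (the rewrite author's own statement) =====
-- stated objective: simpler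
-- what changed: Replaces A's three sequential early-return scans over the list with a single pass that scores each pdf (0 = preferred keyword, 1 = no 'anlagen', 2 = otherwise) and keeps the first best-scoring pdf, returning immediately on a score of 0; first-minimum tie-breaking reproduces A's first-match-per-stage choice.
import Mathlib
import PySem

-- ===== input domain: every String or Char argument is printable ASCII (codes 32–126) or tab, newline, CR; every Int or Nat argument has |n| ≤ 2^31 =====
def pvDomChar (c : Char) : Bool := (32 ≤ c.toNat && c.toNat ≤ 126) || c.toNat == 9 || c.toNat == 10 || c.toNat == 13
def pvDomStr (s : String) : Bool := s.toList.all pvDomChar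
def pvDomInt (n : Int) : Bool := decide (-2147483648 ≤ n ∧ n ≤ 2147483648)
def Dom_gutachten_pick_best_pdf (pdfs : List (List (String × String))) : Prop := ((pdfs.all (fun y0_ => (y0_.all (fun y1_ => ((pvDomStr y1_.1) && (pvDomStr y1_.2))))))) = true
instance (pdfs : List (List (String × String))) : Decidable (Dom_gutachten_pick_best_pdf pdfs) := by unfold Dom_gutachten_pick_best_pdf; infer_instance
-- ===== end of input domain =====

-- B replaces A's three sequential early-return scans by ONE pass that scores each pdf
-- (0 = preferred keyword, 1 = no 'anlagen', 2 = otherwise) and keeps the first best-scoring pdf,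
-- returning immediately on a score of 0 (objective: simpler).

-- the shared keyword list (data only) and the two filename predicates it induces
def pvPreferred : List String := ["gutachten", " g ", "sachverst", "sv-", "/g-", "g "]

def pvHasKw (pdf : List (String × String)) : Bool :=
  pvPreferred.any (fun kw => PySem.Str.isIn kw (PySem.Str.lower ((PySem.Dict.mk pdf).getD "filename" "")))


-- ===== PORT A =====
-- pdf["filename"] is ported as getD _ "filename" "": exact under Pre_ (KeyError inputs excluded)
def gutachten_pick_best_pdf (pdfs : List (List (String × String))) : Option (List (String × String)) :=
  match pdfs.find? (fun pdf =>
      pvPreferred.any (fun kw => PySem.Str.isIn kw (PySem.Str.lower ((PySem.Dict.mk pdf).getD "filename" "")))) with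
  | some pdf => some pdf
  | none =>
    match pdfs.find? (fun pdf =>
        !(PySem.Str.isIn "anlagen" (PySem.Str.lower ((PySem.Dict.mk pdf).getD "filename" "")))) with
    | some pdf => some pdf
    | none => pdfs.head?

-- ===== PORT B =====
-- pdf["filename"] is ported as getD _ "filename" "": exact under Pre_ (KeyError inputs excluded)
def pvPriority (pdf : List (String × String)) : Int :=
  let name := PySem.Str.lower ((PySem.Dict.mk pdf).getD "filename" "")
  if pvPreferred.any (fun kw => PySem.Str.isIn kw name) then 0
  else if !(PySem.Str.isIn "anlagen" name) then 1
  else 2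

-- the 'for pdf in pdfs' loop with state (best, best_p) and the early return on p == 0
def pvBestLoop (pdfss : List (List (String × String))) (best : Option (List (String × String)))
    (best_p : Int) : Option (List (String × String)) :=
  match pdfss with
  | [] => best
  | pdf :: rest =>
    let p := pvPriority pdf
    if p = 0 then some pdf
    else if p < best_p then pvBestLoop rest (some pdf) p
    else pvBestLoop rest best best_p

def gutachten_pick_best_pdf_alt (pdfs : List (List (String × String))) : Option (List (String × String)) :=
  pvBestLoop pdfs none 3

-- ===== PRECONDITION & SPEC =====
-- Pre_ excludes exactly the inputs on which the Python A raises KeyError: some pdf without a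
-- "filename" key that A's first scan reaches (i.e. not preceded by a preferred-keyword match).
def Pre_gutachten_pick_best_pdf (pdfs : List (List (String × String))) : Prop :=
  ∀ i : Fin pdfs.length, (PySem.Dict.mk pdfs[i]).contains "filename" = true ∨
    ∃ j : Fin pdfs.length, j.val < i.val ∧ pvHasKw pdfs[j] = true
instance (pdfs : List (List (String × String))) : Decidable (Pre_gutachten_pick_best_pdf pdfs) := by
  unfold Pre_gutachten_pick_best_pdf; infer_instance

def pvWitness_gutachten_pick_best_pdf : (List (List (String × String))) :=
  [[("filename", "Anlagen.pdf")], [("filename", "Gutachten 1.pdf")]]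

def Spec_gutachten_pick_best_pdf (pdfs : List (List (String × String))) (out : Option (List (String × String))) : Prop := out = gutachten_pick_best_pdf_alt pdfs
instance (pdfs : List (List (String × String))) (out : Option (List (String × String))) : Decidable (Spec_gutachten_pick_best_pdf pdfs out) := by unfold Spec_gutachten_pick_best_pdf; infer_instance

-- ===== CLAIM (what is proved, stated in full; the proofs are below) =====
def Claim_equal_gutachten_pick_best_pdf : Prop := ∀ (pdfs : List (List (String × String))), Dom_gutachten_pick_best_pdf pdfs → Pre_gutachten_pick_best_pdf pdfs → Spec_gutachten_pick_best_pdf pdfs (gutachten_pick_best_pdf pdfs)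

-- ===== LEMMAS AND PROOFS =====
def pvNoAnlagen (pdf : List (String × String)) : Bool :=
  !(PySem.Str.isIn "anlagen" (PySem.Str.lower ((PySem.Dict.mk pdf).getD "filename" "")))

-- the priority written through the two predicates
theorem pvPriority_spec (pdf : List (String × String)) :
    pvPriority pdf = if pvHasKw pdf then 0 else if pvNoAnlagen pdf then 1 else 2 := rfl

theorem pv_loop1 (t : List (List (String × String))) (m : List (String × String)) :
    pvBestLoop t (some m) 1 =
      (match t.find? pvHasKw with
       | some y => some y
       | none => some m) := by
  induction t generalizing m with
  | nil => rfl
  | cons x t ih =>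
    by_cases hx : pvHasKw x = true
    · have h0 : pvPriority x = 0 := by rw [pvPriority_spec, if_pos hx]
      simp only [pvBestLoop, h0, List.find?_cons_of_pos hx]
      norm_num
    · by_cases hb : pvNoAnlagen x = true
      · have h1 : pvPriority x = 1 := by rw [pvPriority_spec, if_neg (by simp [hx]), if_pos hb]
        simp only [pvBestLoop, h1, List.find?_cons_of_neg hx]
        norm_num
        exact ih m
      · have h2 : pvPriority x = 2 := by
          rw [pvPriority_spec, if_neg (by simp [hx]), if_neg (by simp [hb])]
        simp only [pvBestLoop, h2, List.find?_cons_of_neg hx]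
        norm_num
        exact ih m

theorem pv_loop2 (t : List (List (String × String))) (m : List (String × String)) :
    pvBestLoop t (some m) 2 =
      (match t.find? pvHasKw with
       | some y => some y
       | none =>
         match t.find? pvNoAnlagen with
         | some y => some y
         | none => some m) := by
  induction t generalizing m with
  | nil => rfl
  | cons x t ih =>
    by_cases hx : pvHasKw x = true
    · have h0 : pvPriority x = 0 := by rw [pvPriority_spec, if_pos hx]
      simp only [pvBestLoop, h0, List.find?_cons_of_pos hx]
      norm_num
    · by_cases hb : pvNoAnlagen x = true
      · have h1 : pvPriority x = 1 := by rw [pvPriority_spec, if_neg (by simp [hx]), if_pos hb]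
        simp only [pvBestLoop, h1, List.find?_cons_of_neg hx, List.find?_cons_of_pos hb]
        norm_num
        rw [pv_loop1 t x]
      · have h2 : pvPriority x = 2 := by
          rw [pvPriority_spec, if_neg (by simp [hx]), if_neg (by simp [hb])]
        simp only [pvBestLoop, h2, List.find?_cons_of_neg hx, List.find?_cons_of_neg hb]
        norm_num
        exact ih m

-- ===== VERDICT (by name: the statement is the Claim_ definition above) =====
theorem gutachten_pick_best_pdf_spec : Claim_equal_gutachten_pick_best_pdf := by
  intro pdfs _ _
  unfold Spec_gutachten_pick_best_pdf gutachten_pick_best_pdf gutachten_pick_best_pdf_alt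
  have ha : (fun pdf : List (String × String) =>
      pvPreferred.any (fun kw => PySem.Str.isIn kw (PySem.Str.lower ((PySem.Dict.mk pdf).getD "filename" "")))) = pvHasKw := rfl
  have hb : (fun pdf : List (String × String) =>
      !(PySem.Str.isIn "anlagen" (PySem.Str.lower ((PySem.Dict.mk pdf).getD "filename" "")))) = pvNoAnlagen := rfl
  rw [ha, hb]
  cases pdfs with
  | nil => rfl
  | cons x t =>
    by_cases hx : pvHasKw x = true
    · have h0 : pvPriority x = 0 := by rw [pvPriority_spec, if_pos hx]
      simp only [pvBestLoop, h0, List.find?_cons_of_pos hx]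
      norm_num
    · by_cases hbx : pvNoAnlagen x = true
      · have h1 : pvPriority x = 1 := by rw [pvPriority_spec, if_neg (by simp [hx]), if_pos hbx]
        simp only [pvBestLoop, h1, List.find?_cons_of_neg hx, List.find?_cons_of_pos hbx]
        norm_num
        rw [pv_loop1 t x]
      · have h2 : pvPriority x = 2 := by
          rw [pvPriority_spec, if_neg (by simp [hx]), if_neg (by simp [hbx])]
        simp only [pvBestLoop, h2, List.find?_cons_of_neg hx, List.find?_cons_of_neg hbx]
        norm_num
        rw [pv_loop2 t x]
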